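-- pv_equiv track=rewrite | github.com/arsen-zaharenko/parallel_programming | lab_4.py | divide_matrix
-- ===== SOURCE A (Python) =====
-- def divide_matrix(matrix: list, P: int) -> list:
-- 	row_size = len(matrix[0])
-- 	matrices_number = len(matrix) // P
--
-- 	while matrices_number * P - len(matrix):
-- 		matrix.append([0] * row_size)
-- 		matrices_number = len(matrix) // P
--
-- 	matrices = [[matrix[matrices_number * i + j] for j in range(matrices_number)] for i in range(P)]
--
-- 	return matrices
-- ===== SOURCE B (Python) =====
-- def divide_matrix(matrix: list, P: int) -> list:
--     row_size = len(matrix[0])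
--     k = len(matrix) // P + (1 if len(matrix) % P else 0)
--     blocks, cur = [], []
--     for row in matrix:
--         cur.append(row)
--         if len(cur) == k:
--             blocks.append(cur)
--             cur = []
--     while len(blocks) < P:
--         while len(cur) < k:
--             cur.append([0] * row_size)
--         blocks.append(cur)
--         cur = []
--     return blocks
-- ===== Notes on version B (the rewrite author's own statement) =====
-- stated objective: alternative
-- what changed: A pads the matrix to a multiple of P with a while loop and then gathers blocks by random-access index arithmetic matrix[mn*i+j]; B never pads the input: it computes the block size k = ceil(n/P) once, distributes the rows into blocks in a single left-to-right pass with an accumulator, and afterwards tops up the last (and any missing) blocks with zero rows.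
import Mathlib
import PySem

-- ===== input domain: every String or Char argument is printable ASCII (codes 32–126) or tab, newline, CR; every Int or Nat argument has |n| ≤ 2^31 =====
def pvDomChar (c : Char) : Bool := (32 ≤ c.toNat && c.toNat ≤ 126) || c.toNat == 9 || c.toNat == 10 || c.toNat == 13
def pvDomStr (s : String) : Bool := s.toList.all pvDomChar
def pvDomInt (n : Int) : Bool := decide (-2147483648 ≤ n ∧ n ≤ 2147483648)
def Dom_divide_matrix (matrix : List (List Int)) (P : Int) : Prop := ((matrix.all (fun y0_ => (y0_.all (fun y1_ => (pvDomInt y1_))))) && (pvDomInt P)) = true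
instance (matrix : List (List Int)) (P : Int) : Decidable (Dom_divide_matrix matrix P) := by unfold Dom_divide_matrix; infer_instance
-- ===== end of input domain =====

-- B splits the matrix into P blocks of k = ceil(n/P) rows by a single left-to-right pass
-- with an accumulator, topping up missing rows with zeros afterwards, instead of A's
-- pad-the-matrix-while-loop followed by random-access index gathering (objective:
-- alternative). A mutates `matrix` (appends the pad rows) while B does not; the theorems
-- are about the return value only.

-- ===== PORT A =====
-- A's while loop: append a zero row while matrices_number * P - len(matrix) != 0.
-- Fuel P.natAbs only makes the recursion total: whenever Python's loop terminates
-- (P ≠ 0) it needs at most |P| - 1 iterations, so the fuel is never exhausted there.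
def pvPadLoop (fuel : Nat) (m : List (List Int)) (P : Int) (row_size : Nat) : List (List Int) :=
  match fuel with
  | 0 => m
  | f + 1 =>
      let mn := PySem.Int.floordiv (m.length : Int) P
      if mn * P - (m.length : Int) = 0 then m
      else pvPadLoop f (m ++ [List.replicate row_size 0]) P row_size

def divide_matrix (matrix : List (List Int)) (P : Int) : List (List (List Int)) :=
  match PySem.List.pyGet? matrix 0 with
  | none => []        -- matrix[0] raises IndexError on empty input; excluded by Pre_
  | some row0 =>
      let row_size := row0.length
      let m := pvPadLoop P.natAbs matrix P row_size
      let mn := PySem.Int.floordiv (m.length : Int) P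
      (PySem.List.pyRange 0 P 1).map (fun i =>
        (PySem.List.pyRange 0 mn 1).map (fun j =>
          PySem.List.pyGetD m (mn * i + j) []))

-- ===== PORT B =====
-- the body of B's `for row in matrix` loop
def pvDistStep (k : Int) (s : List (List (List Int)) × List (List Int)) (row : List Int) :
    List (List (List Int)) × List (List Int) :=
  let cur' := s.2 ++ [row]
  if (cur'.length : Int) = k then (s.1 ++ [cur'], []) else (s.1, cur')

-- B's inner `while len(cur) < k: cur.append([0]*row_size)`
def pvPadCur (k : Int) (rs : Nat) (cur : List (List Int)) : List (List Int) :=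
  if h : (cur.length : Int) < k then pvPadCur k rs (cur ++ [List.replicate rs 0]) else cur
termination_by (k - (cur.length : Int)).toNat
decreasing_by simp only [List.length_append, List.length_cons, List.length_nil]; omega

-- B's outer `while len(blocks) < P` loop
def pvFillBlocks (P k : Int) (rs : Nat) (blocks : List (List (List Int)))
    (cur : List (List Int)) : List (List (List Int)) :=
  if h : (blocks.length : Int) < P then
    pvFillBlocks P k rs (blocks ++ [pvPadCur k rs cur]) []
  else blocks
termination_by (P - (blocks.length : Int)).toNat
decreasing_by simp only [List.length_append, List.length_cons, List.length_nil]; omega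

def divide_matrix_alt (matrix : List (List Int)) (P : Int) : List (List (List Int)) :=
  match PySem.List.pyGet? matrix 0 with
  | none => []        -- matrix[0] raises IndexError on empty input; excluded by Pre_
  | some row0 =>
      let row_size := row0.length
      let k := PySem.Int.floordiv (matrix.length : Int) P +
               (if PySem.Int.mod (matrix.length : Int) P = 0 then 0 else 1)
      let s := matrix.foldl (pvDistStep k) ([], [])
      pvFillBlocks P k row_size s.1 s.2

-- ===== PRECONDITION & SPEC =====
-- Pre_ excludes exactly the inputs on which Python A raises: matrix = [] (IndexError on
-- matrix[0]) and P = 0 (ZeroDivisionError on len(matrix) // P).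
def Pre_divide_matrix (matrix : List (List Int)) (P : Int) : Prop :=
  matrix ≠ [] ∧ P ≠ 0
instance (matrix : List (List Int)) (P : Int) : Decidable (Pre_divide_matrix matrix P) := by
  unfold Pre_divide_matrix; infer_instance

def pvWitness_divide_matrix : List (List Int) × Int := ([[1, 2], [3, 4], [5, 6]], 2)

def Spec_divide_matrix (matrix : List (List Int)) (P : Int) (out : List (List (List Int))) : Prop := out = divide_matrix_alt matrix P
instance (matrix : List (List Int)) (P : Int) (out : List (List (List Int))) : Decidable (Spec_divide_matrix matrix P out) := by unfold Spec_divide_matrix; infer_instance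

-- ===== CLAIM (what is proved, stated in full; the proofs are below) =====
def Claim_equal_divide_matrix : Prop := ∀ (matrix : List (List Int)) (P : Int), Dom_divide_matrix matrix P → Pre_divide_matrix matrix P → Spec_divide_matrix matrix P (divide_matrix matrix P)

-- ===== LEMMAS AND PROOFS =====

-- In Python (and PySem), for 0 < P and P ∤ n: (-(n+1)) % P = (-n) % P - 1.
lemma pvMod_succ (n P : Int) (hP : 0 < P) (h : ¬ P ∣ n) :
    PySem.Int.mod (-(n + 1)) P = PySem.Int.mod (-n) P - 1 := by
  have h1 : PySem.Int.mod (-n) P = (-n) % P := PySem.Int.mod_eq_emod_of_pos hP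
  have h2 : PySem.Int.mod (-(n + 1)) P = (-(n + 1)) % P := PySem.Int.mod_eq_emod_of_pos hP
  rw [h1, h2]
  have hr0 : 0 ≤ (-n) % P := Int.emod_nonneg _ (by omega)
  have hrP : (-n) % P < P := Int.emod_lt_of_pos _ hP
  have hne : (-n) % P ≠ 0 := by
    intro h0
    exact h (Int.dvd_neg.mp (Int.dvd_of_emod_eq_zero h0))
  have key : -(n + 1) = ((-n) % P - 1) + P * ((-n) / P) := by
    have := Int.emod_def (-n) P
    omega
  rw [key, Int.add_mul_emod_self_left]
  exact Int.emod_eq_of_lt (by omega) (by omega)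

-- A's while loop appends exactly (-len) % P zero rows (0 < P).
lemma pvPadLoop_eq (fuel : Nat) (P : Int) (hP : 0 < P) (rs : Nat) :
    ∀ (m : List (List Int)),
      (PySem.Int.mod (-(m.length : Int)) P).toNat ≤ fuel →
      pvPadLoop fuel m P rs =
        m ++ List.replicate (PySem.Int.mod (-(m.length : Int)) P).toNat (List.replicate rs 0) := by
  induction fuel with
  | zero =>
      intro m hf
      have : (PySem.Int.mod (-(m.length : Int)) P).toNat = 0 := by omega
      simp [pvPadLoop, this]
  | succ f ih =>
      intro m hf
      by_cases hdvd : P ∣ (m.length : Int)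
      · have hmod : PySem.Int.mod (-(m.length : Int)) P = 0 :=
          (PySem.Int.mod_eq_zero_iff_dvd _ _).mpr (Int.dvd_neg.mpr hdvd)
        have hcond : PySem.Int.floordiv (m.length : Int) P * P - (m.length : Int) = 0 := by
          have h1 := PySem.Int.floordiv_mul_add_mod (m.length : Int) P
          have h2 : PySem.Int.mod (m.length : Int) P = 0 :=
            (PySem.Int.mod_eq_zero_iff_dvd _ _).mpr hdvd
          omega
        simp [pvPadLoop, hcond, hmod]
      · have hmod0 : PySem.Int.mod (m.length : Int) P ≠ 0 := by
          intro h0; exact hdvd ((PySem.Int.mod_eq_zero_iff_dvd _ _).mp h0)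
        have hcond : ¬ (PySem.Int.floordiv (m.length : Int) P * P - (m.length : Int) = 0) := by
          intro h0
          have h1 := PySem.Int.floordiv_mul_add_mod (m.length : Int) P
          omega
        have hstep : PySem.Int.mod (-((m.length : Int) + 1)) P
            = PySem.Int.mod (-(m.length : Int)) P - 1 := pvMod_succ _ _ hP hdvd
        have hpos : 0 < PySem.Int.mod (-(m.length : Int)) P := by
          have hnn := PySem.Int.mod_nonneg (-(m.length : Int)) hP
          have : PySem.Int.mod (-(m.length : Int)) P ≠ 0 := by
            intro h0
            exact hdvd (Int.dvd_neg.mp ((PySem.Int.mod_eq_zero_iff_dvd _ _).mp h0))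
          omega
        have := ih (m ++ [List.replicate rs 0]) (by
          simp only [List.length_append, List.length_singleton]
          push_cast
          rw [show -((m.length : Int) + 1) = -((m.length : Int) + 1) from rfl, hstep]
          omega)
        rw [pvPadLoop, if_neg hcond, this]
        simp only [List.length_append, List.length_singleton]
        have harg : (-(((m.length : Int) + 1))) = -((m.length + 1 : Nat) : Int) := by push_cast; ring
        rw [← harg, hstep]
        have hT : (PySem.Int.mod (-(m.length : Int)) P).toNat
            = (PySem.Int.mod (-(m.length : Int)) P - 1).toNat + 1 := by omega
        rw [List.append_assoc, hT]
        simp [List.replicate_succ]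

-- If the block size is ≤ 0, B's distribution pass never closes a block.
lemma pvFoldDist_nonpos (k : Int) (hk : k ≤ 0) :
    ∀ (L : List (List Int)) (bs : List (List (List Int))) (cs : List (List Int)),
      List.foldl (pvDistStep k) (bs, cs) L = (bs, cs ++ L) := by
  intro L
  induction L with
  | nil => intro bs cs; simp
  | cons row tl ih =>
      intro bs cs
      have hne : ¬ (((cs ++ [row]).length : Int) = k) := by
        simp only [List.length_append, List.length_singleton]
        omega
      simp only [List.foldl_cons, pvDistStep, if_neg hne, ih]
      simp

-- B's distribution pass, staying below one block: it only accumulates into cur.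
lemma pvFoldDist_small (k : Int) (kn : Nat) (hk : k = (kn : Int)) :
    ∀ (L : List (List Int)) (bs : List (List (List Int))) (cs : List (List Int)),
      cs.length + L.length < kn →
      List.foldl (pvDistStep k) (bs, cs) L = (bs, cs ++ L) := by
  intro L
  induction L with
  | nil => intro bs cs _; simp
  | cons row tl ih =>
      intro bs cs hlt
      have hne : ¬ (((cs ++ [row]).length : Int) = k) := by
        simp only [List.length_append, List.length_singleton, hk]
        simp only [List.length_cons] at hlt
        omega
      simp only [List.foldl_cons, pvDistStep, if_neg hne]
      rw [ih bs (cs ++ [row]) (by simp at hlt ⊢; omega)]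
      simp

-- crossing one block boundary
lemma pvFoldDist_cross (k : Int) (kn : Nat) (hk : k = (kn : Int)) :
    ∀ (L : List (List Int)) (bs : List (List (List Int))) (cs : List (List Int)),
      cs.length < kn → kn ≤ cs.length + L.length →
      List.foldl (pvDistStep k) (bs, cs) L =
        List.foldl (pvDistStep k) (bs ++ [cs ++ L.take (kn - cs.length)], [])
          (L.drop (kn - cs.length)) := by
  intro L
  induction L with
  | nil => intro bs cs h1 h2; simp at h2; omega
  | cons row tl ih =>
      intro bs cs h1 h2
      by_cases hfull : cs.length + 1 = kn
      · have heq : (((cs ++ [row]).length : Int) = k) := by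
          simp only [List.length_append, List.length_singleton, hk]
          omega
        have hone : kn - cs.length = 1 := by omega
        simp only [List.foldl_cons, pvDistStep, if_pos heq, hone, List.drop_succ_cons,
          List.drop_zero, show List.take 1 (row :: tl) = [row] from rfl]
      · have hne : ¬ (((cs ++ [row]).length : Int) = k) := by
          simp only [List.length_append, List.length_singleton, hk]
          omega
        simp only [List.foldl_cons, pvDistStep, if_neg hne]
        rw [ih bs (cs ++ [row]) (by simp; omega)
          (by simp only [List.length_append, List.length_singleton, List.length_cons] at h2 ⊢; omega)]
        have hpos : kn - cs.length = (kn - (cs.length + 1)) + 1 := by omega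
        simp only [List.length_append, List.length_singleton, hpos, List.take_succ_cons,
          List.drop_succ_cons, List.append_assoc, List.singleton_append, List.cons_append,
          List.nil_append]

-- B's distribution pass from the empty state: full chunks plus the remainder.
lemma pvFoldDist_chunks (k : Int) (kn : Nat) (hk : k = (kn : Int)) (hk1 : 1 ≤ kn)
    (L : List (List Int)) (bs : List (List (List Int))) :
    List.foldl (pvDistStep k) (bs, []) L =
      (bs ++ (List.range (L.length / kn)).map (fun i => (L.drop (i * kn)).take kn),
       L.drop ((L.length / kn) * kn)) := by
  induction hn : L.length using Nat.strong_induction_on generalizing L bs with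
  | _ n ih =>
    subst hn
    by_cases hsm : L.length < kn
    · have hq : L.length / kn = 0 := Nat.div_eq_of_lt hsm
      rw [pvFoldDist_small k kn hk L bs [] (by simpa using hsm)]
      simp [hq]
    · push_neg at hsm
      have hcross := pvFoldDist_cross k kn hk L bs [] (by simp; omega) (by simpa using hsm)
      simp only [List.length_nil, Nat.sub_zero, List.nil_append] at hcross
      rw [hcross]
      rw [ih (L.drop kn).length (by rw [List.length_drop]; omega) (L.drop kn)
        (bs ++ [L.take kn]) rfl]
      
      have hq : L.length / kn = (L.drop kn).length / kn + 1 := by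
        rw [List.length_drop]
        conv_lhs => rw [show L.length = (L.length - kn) + kn from by omega]
        rw [Nat.add_div_right _ (by omega)]
      rw [hq, List.length_drop]
      simp only [Prod.mk.injEq]
      constructor
      · rw [List.range_succ_eq_map, List.map_cons, List.map_map]
        simp only [Nat.zero_mul, List.drop_zero, List.append_assoc, List.singleton_append]
        congr 2
        apply List.map_congr_left
        intro i _
        simp only [Function.comp_apply, List.drop_drop, Nat.succ_eq_add_one]
        congr 2
        rw [add_one_mul, Nat.add_comm]
      · rw [List.drop_drop]
        congr 1
        rw [add_one_mul, Nat.add_comm]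

-- the inner while loop pads cur up to kn rows with fresh zero rows
lemma pvPadCur_eq (k : Int) (rs : Nat) (kn : Nat) (hk : k = (kn : Int)) :
    ∀ (cur : List (List Int)), cur.length ≤ kn →
      pvPadCur k rs cur = cur ++ List.replicate (kn - cur.length) (List.replicate rs 0) := by
  suffices H : ∀ (m : Nat) (cur : List (List Int)), cur.length ≤ kn → kn - cur.length = m →
      pvPadCur k rs cur = cur ++ List.replicate (kn - cur.length) (List.replicate rs 0) by
    intro cur h
    exact H (kn - cur.length) cur h rfl
  intro m
  induction m with
  | zero =>
      intro cur h hm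
      have hstop : ¬ ((cur.length : Int) < k) := by rw [hk]; omega
      rw [pvPadCur, dif_neg hstop, show kn - cur.length = 0 from hm]
      simp
  | succ m ihm =>
      intro cur h hm
      have hgo : ((cur.length : Int) < k) := by rw [hk]; omega
      rw [pvPadCur, dif_pos hgo]
      rw [ihm (cur ++ [List.replicate rs 0]) (by simp; omega) (by simp; omega)]
      simp only [List.length_append, List.length_cons, List.length_nil, List.append_assoc,
        List.singleton_append]
      rw [show kn - cur.length = (kn - (cur.length + 1)) + 1 from by omega, List.replicate_succ]

lemma pvFillBlocks_stop (P k : Int) (rs : Nat) (blocks : List (List (List Int)))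
    (cur : List (List Int)) (h : ¬ ((blocks.length : Int) < P)) :
    pvFillBlocks P k rs blocks cur = blocks := by
  rw [pvFillBlocks, dif_neg h]

-- the outer while loop, when it runs, appends the padded cur then all-zero blocks
lemma pvFillBlocks_run (P k : Int) (rs : Nat) (pn : Nat) (hp : P = (pn : Int)) :
    ∀ (m : Nat) (blocks : List (List (List Int))) (cur : List (List Int)),
      pn - blocks.length = m → 1 ≤ m →
      pvFillBlocks P k rs blocks cur =
        blocks ++ pvPadCur k rs cur :: List.replicate (m - 1) (pvPadCur k rs []) := by
  intro m
  induction m with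
  | zero => intro _ _ _ h; omega
  | succ m ihm =>
      intro blocks cur hm _
      have hgo : ((blocks.length : Int) < P) := by rw [hp]; exact_mod_cast (by omega : blocks.length < pn)
      rw [pvFillBlocks, dif_pos hgo]
      by_cases hm0 : m = 0
      · subst hm0
        rw [pvFillBlocks_stop _ _ _ _ _ (by
          simp only [List.length_append, List.length_cons, List.length_nil, hp]
          exact_mod_cast (by omega : ¬ blocks.length + 1 < pn))]
        simp
      · rw [ihm (blocks ++ [pvPadCur k rs cur]) [] (by simp; omega) (by omega)]
        rw [show m + 1 - 1 = (m - 1) + 1 from by omega, List.replicate_succ]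
        simp


-- linear arithmetic helpers (the products q*kn etc. are passed as plain variables)
lemma pvArith0 (a b c : Nat) (h : a + b ≤ c) : min b (c - a) = b := by omega

lemma pvArith1 (a kn N padnat : Nat) (h1 : a ≤ N) (h2 : a + kn ≤ N + padnat) :
    kn - (N - a) ≤ padnat := by omega

lemma pvArith2 (a kn N : Nat) (h : N < a + kn) : N - a ≤ kn := by omega

lemma pvArith3 (a kn N padnat : Nat) (hN : N ≤ a) (h : a + kn ≤ N + padnat) :
    kn ≤ padnat - (a - N) := by omega

lemma pvArith4 (a b c t : Nat) (h : a + b ≤ c) (ht : t < b) : a + t < c := by omega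

lemma pvDivBound (a b : Nat) (hb : 0 < b) : a < (a / b + 1) * b := by
  have h1 := Nat.div_add_mod a b
  have h2 := Nat.mod_lt a hb
  calc a = b * (a / b) + a % b := h1.symm
    _ < b * (a / b) + b := Nat.add_lt_add_left h2 _
    _ = (a / b + 1) * b := by ring

-- one block of A's gather, as a take/drop chunk
lemma pvABlock (M : List (List Int)) (kk : Int) (kn : Nat) (hk : kk = (kn : Int))
    (inat : Nat) (hle : inat * kn + kn ≤ M.length) :
    (PySem.List.pyRange 0 kk 1).map (fun j => PySem.List.pyGetD M (kk * (inat : Int) + j) []) =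
      (M.drop (inat * kn)).take kn := by
  subst hk
  rw [PySem.List.pyRange_one, List.map_map]
  apply List.ext_getElem
  · simp only [List.length_map, List.length_range, List.length_take, List.length_drop]
    rw [show ((kn : Int) - 0) = (kn : Int) from by ring, Int.toNat_natCast]
    exact (pvArith0 _ _ _ hle).symm
  · intro t h1 h2
    simp only [List.length_map, List.length_range] at h1
    have htkn : t < kn := by
      rw [show ((kn : Int) - 0) = (kn : Int) from by ring, Int.toNat_natCast] at h1
      exact h1
    simp only [List.getElem_map, List.getElem_range, Function.comp_apply]
    have hidx : (kn : Int) * (inat : Int) + ((0 : Int) + (t : Int)) = ((inat * kn + t : Nat) : Int) := by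
      push_cast; ring
    rw [hidx, PySem.List.pyGetD_natCast,
      List.getD_eq_getElem _ _ (pvArith4 _ _ _ _ hle htkn)]
    simp only [List.getElem_take, List.getElem_drop]

-- chunks of a padded list: fully inside the original part
lemma pvChunkLow (xs ys : List (List Int)) (kn a : Nat) (h : a + kn ≤ xs.length) :
    ((xs ++ ys).drop a).take kn = (xs.drop a).take kn := by
  rw [List.drop_append_of_le_length (by omega),
    List.take_append_of_le_length (by rw [List.length_drop]; omega)]

-- the chunk crossing the boundary between the original part and the padding
lemma pvChunkMid (xs ys : List (List Int)) (kn a : Nat) (ha : a ≤ xs.length)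
    (hb : xs.length ≤ a + kn) :
    ((xs ++ ys).drop a).take kn = xs.drop a ++ ys.take (kn - (xs.length - a)) := by
  rw [List.drop_append, show a - xs.length = 0 from by omega, List.drop_zero,
    List.take_append, List.take_of_length_le (by rw [List.length_drop]; omega),
    List.length_drop]

-- chunks fully inside the padding
lemma pvChunkHigh (xs ys : List (List Int)) (kn a : Nat) (ha : xs.length ≤ a) :
    ((xs ++ ys).drop a).take kn = (ys.drop (a - xs.length)).take kn := by
  rw [List.drop_append, List.drop_eq_nil_of_le ha, List.nil_append]

-- ===== VERDICT (by name: the statement is the Claim_ definition above) =====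
theorem divide_matrix_spec : Claim_equal_divide_matrix := by
  intro matrix P _hdom hpre
  obtain ⟨hne, hP0⟩ := hpre
  unfold Spec_divide_matrix divide_matrix divide_matrix_alt
  obtain ⟨r, rest, rfl⟩ : ∃ r rest, matrix = r :: rest := by
    cases matrix with
    | nil => exact absurd rfl hne
    | cons r rest => exact ⟨r, rest, rfl⟩
  rw [PySem.List.pyGet?_zero_cons]
  simp only
  rcases lt_or_gt_of_ne hP0 with hP | hP
  · -- P < 0: A maps over an empty range; B closes no block and its outer while never runs
    have hn1 : (1 : Int) ≤ ((r :: rest).length : Int) := by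
      have : 0 < (r :: rest).length := by simp
      exact_mod_cast this
    have hm := PySem.Int.floordiv_mul_add_mod ((r :: rest).length : Int) P
    have hb := PySem.Int.mod_neg_bounds ((r :: rest).length : Int) hP
    have hd : PySem.Int.floordiv ((r :: rest).length : Int) P ≤ -1 := by
      by_contra hcon
      push_neg at hcon
      have h0 : 0 ≤ PySem.Int.floordiv ((r :: rest).length : Int) P := by omega
      nlinarith [hm, hb.1, hb.2]
    set kB := PySem.Int.floordiv ((r :: rest).length : Int) P +
      (if PySem.Int.mod ((r :: rest).length : Int) P = 0 then (0 : Int) else 1) with hkB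
    have hkB0 : kB ≤ 0 := by rw [hkB]; split_ifs <;> omega
    rw [PySem.List.pyRange_one_eq_nil hP.le, pvFoldDist_nonpos kB hkB0]
    rw [pvFillBlocks_stop _ _ _ _ _ (by simp; omega)]
    simp
  · -- 0 < P
    have hNpos : 0 < (r :: rest).length := by simp
    have hNc : (1 : Int) ≤ ((r :: rest).length : Int) := by exact_mod_cast hNpos
    -- A's while loop = append (-N) % P zero rows
    have hpad0 : 0 ≤ PySem.Int.mod (-((r :: rest).length : Int)) P :=
      PySem.Int.mod_nonneg _ hP
    have hpadlt : PySem.Int.mod (-((r :: rest).length : Int)) P < P :=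
      PySem.Int.mod_lt _ hP
    rw [pvPadLoop_eq P.natAbs P hP r.length (r :: rest) (by omega)]
    set N := (r :: rest).length with hNdef
    set pad : Int := PySem.Int.mod (-(N : Int)) P with hpaddef
    set padnat := pad.toNat with hpadnatdef
    have hpadcast : (padnat : Int) = pad := Int.toNat_of_nonneg hpad0
    set Mpad := (r :: rest) ++ List.replicate padnat (List.replicate r.length 0) with hMpad
    have hMlenN : Mpad.length = N + padnat := by
      rw [hMpad, hNdef]
      simp only [List.length_append, List.length_replicate, List.length_cons]
    have hMlen : (Mpad.length : Int) = (N : Int) + pad := by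
      rw [hMlenN]; push_cast; omega
    -- B's k equals A's matrices_number after padding
    have hdm := PySem.Int.floordiv_mul_add_mod (N : Int) P
    have hm0 := PySem.Int.mod_nonneg (N : Int) hP
    have hmlt := PySem.Int.mod_lt (N : Int) hP
    set kB := PySem.Int.floordiv (N : Int) P +
      (if PySem.Int.mod (N : Int) P = 0 then (0 : Int) else 1) with hkB
    have hpadval : pad = (if PySem.Int.mod (N : Int) P = 0 then (0 : Int)
        else P - PySem.Int.mod (N : Int) P) := by
      by_cases hz : PySem.Int.mod (N : Int) P = 0
      · rw [if_pos hz, hpaddef]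
        exact (PySem.Int.mod_eq_zero_iff_dvd _ _).mpr
          (Int.dvd_neg.mpr ((PySem.Int.mod_eq_zero_iff_dvd _ _).mp hz))
      · rw [if_neg hz, hpaddef, PySem.Int.mod_eq_emod_of_pos hP]
        have hPd : P * (-(PySem.Int.floordiv (N : Int) P) - 1)
            = -(PySem.Int.floordiv (N : Int) P * P) - P := by ring
        have hkey : -(N : Int) = (P - PySem.Int.mod (N : Int) P) +
            P * (-(PySem.Int.floordiv (N : Int) P) - 1) := by
          rw [hPd]; omega
        rw [hkey, Int.add_mul_emod_self_left]
        exact Int.emod_eq_of_lt (by omega) (by omega)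
    have hkP : kB * P = (N : Int) + pad := by
      rw [hkB, hpadval]
      split_ifs with hz
      · rw [add_zero, add_zero]; linarith [hdm]
      · rw [add_mul, one_mul]; linarith [hdm]
    have hkB1 : 1 ≤ kB := by
      by_contra hcon
      push_neg at hcon
      have hkle : kB ≤ 0 := by omega
      have : kB * P ≤ 0 := mul_nonpos_of_nonpos_of_nonneg hkle hP.le
      linarith [hkP]
    set kn := kB.toNat with hkndef
    have hknc : (kn : Int) = kB := Int.toNat_of_nonneg (by omega)
    have hkn1 : 1 ≤ kn := by omega
    set pn := P.toNat with hpndef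
    have hpnc : (pn : Int) = P := Int.toNat_of_nonneg hP.le
    have hpn1 : 1 ≤ pn := by omega
    have hknpn : kn * pn = N + padnat := by
      have hcast : ((kn * pn : Nat) : Int) = ((N + padnat : Nat) : Int) := by
        push_cast
        rw [hknc, hpnc]
        linarith [hkP, hpadcast]
      exact_mod_cast hcast
    have hmn : PySem.Int.floordiv (Mpad.length : Int) P = kB := by
      rw [PySem.Int.floordiv_eq_ediv_of_pos hP, hMlen, ← hkP,
        Int.mul_ediv_cancel _ (ne_of_gt hP)]
    rw [hmn, PySem.List.pyRange_one 0 P, List.map_map,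
      show ((P : Int) - 0) = P from by ring, ← hpndef]
    -- B: distribute into chunks
    rw [pvFoldDist_chunks kB kn hknc.symm hkn1 (r :: rest) []]
    simp only [List.nil_append, ← hNdef]
    set q := N / kn with hqdef
    have hqk : q * kn ≤ N := Nat.div_mul_le_self N kn
    have hqk2 : N < q * kn + kn := by
      have := pvDivBound N kn (by omega)
      rwa [add_one_mul] at this
    have hNle : N ≤ pn * kn := by
      rw [Nat.mul_comm pn kn, hknpn]; omega
    have hqle : q ≤ pn := Nat.le_of_mul_le_mul_right (le_trans hqk hNle) (by omega)
    by_cases hqpn : q < pn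
    · -- the outer while runs: one partial block, then pn - q - 1 all-zero blocks
      rw [pvFillBlocks_run P kB r.length pn hpnc.symm (pn - q)
        ((List.range q).map (fun i => ((r :: rest).drop (i * kn)).take kn)) _
        (by simp) (by omega)]
      have hremle : ((r :: rest).drop (q * kn)).length ≤ kn := by
        rw [List.length_drop, ← hNdef]; exact pvArith2 _ _ _ hqk2
      rw [pvPadCur_eq kB r.length kn hknc.symm _ hremle,
        pvPadCur_eq kB r.length kn hknc.symm [] (by simp)]
      simp only [List.length_drop, List.length_nil, Nat.sub_zero, List.nil_append, ← hNdef]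
      -- A: split the range pn into range q, the block q, and the trailing blocks
      conv_lhs => rw [show pn = (q + 1) + (pn - q - 1) from by omega]
      rw [List.range_add, List.map_append, List.range_succ, List.map_append]
      have h6 : q * kn + kn ≤ N + padnat := by
        have hmul := Nat.mul_le_mul_right kn (show q + 1 ≤ pn from by omega)
        rw [add_one_mul] at hmul
        calc q * kn + kn ≤ pn * kn := hmul
          _ = kn * pn := Nat.mul_comm pn kn
          _ = N + padnat := hknpn
      simp only [List.append_assoc, List.singleton_append, List.map_map,
        List.map_cons, List.map_nil]
      congr 1
      · -- full chunks
        apply List.map_congr_left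
        intro i hi
        rw [List.mem_range] at hi
        simp only [Function.comp_apply, zero_add]
        have hle : i * kn + kn ≤ N := by
          have hmul := Nat.mul_le_mul_right kn (show i + 1 ≤ q from by omega)
          rw [add_one_mul] at hmul
          exact le_trans hmul hqk
        rw [pvABlock Mpad kB kn hknc.symm i
          (by rw [hMlenN]; exact le_trans hle (Nat.le_add_right N padnat))]
        rw [hMpad, pvChunkLow _ _ _ _ (by rw [← hNdef]; exact hle)]
      congr 1
      · -- the crossing block
        simp only [Function.comp_apply, zero_add]
        rw [pvABlock Mpad kB kn hknc.symm q (by rw [hMlenN]; exact h6)]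
        rw [hMpad, pvChunkMid _ _ _ _ (by rw [← hNdef]; exact hqk)
          (by rw [← hNdef]; exact le_of_lt hqk2)]
        rw [← hNdef, List.take_replicate,
          Nat.min_eq_left (pvArith1 (q * kn) kn N padnat hqk h6)]
      · -- the all-zero blocks
        refine List.eq_replicate_iff.mpr ⟨by simp, ?_⟩
        intro b hbmem
        rw [List.mem_map] at hbmem
        obtain ⟨j, hj, rfl⟩ := hbmem
        rw [List.mem_range] at hj
        simp only [Function.comp_apply, zero_add]
        have hNa : N ≤ (q + 1 + j) * kn := by
          have hmul := Nat.mul_le_mul_right kn (show q + 1 ≤ q + 1 + j from by omega)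
          rw [add_one_mul] at hmul
          exact le_trans (le_of_lt hqk2) hmul
        have hbound : (q + 1 + j) * kn + kn ≤ N + padnat := by
          have hmul := Nat.mul_le_mul_right kn (show q + 1 + j + 1 ≤ pn from by omega)
          rw [add_one_mul] at hmul
          calc (q + 1 + j) * kn + kn ≤ pn * kn := hmul
            _ = kn * pn := Nat.mul_comm pn kn
            _ = N + padnat := hknpn
        rw [pvABlock Mpad kB kn hknc.symm (q + 1 + j) (by rw [hMlenN]; exact hbound)]
        rw [hMpad, pvChunkHigh _ _ _ _ (by rw [← hNdef]; exact hNa), ← hNdef,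
          List.drop_replicate, List.take_replicate,
          Nat.min_eq_left (pvArith3 ((q + 1 + j) * kn) kn N padnat hNa hbound)]
    · -- q = pn: the rows fill all pn blocks exactly; no padding at all
      have hqeq : q = pn := le_antisymm hqle (not_lt.mp hqpn)
      have hpn0 : padnat = 0 := by
        have h4 : kn * pn ≤ N := by
          rw [Nat.mul_comm, ← hqeq]; exact hqk
        rw [hknpn] at h4
        omega
      have hMid : Mpad = r :: rest := by
        rw [hMpad, hpn0]; simp
      rw [pvFillBlocks_stop _ _ _ _ _ (by
        simp only [List.length_map, List.length_range, hqeq, hpnc]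
        omega)]
      rw [← hqeq]
      apply List.map_congr_left
      intro i hi
      rw [List.mem_range] at hi
      simp only [Function.comp_apply, zero_add]
      have hle : i * kn + kn ≤ N := le_trans
        (by have hmul := Nat.mul_le_mul_right kn (show i + 1 ≤ q from by omega)
            rwa [add_one_mul] at hmul) hqk
      rw [pvABlock Mpad kB kn hknc.symm i
        (by rw [hMlenN]; exact le_trans hle (Nat.le_add_right N padnat)), hMid]
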